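-- pv_equiv track=rewrite | github.com/adienes/remainder-tree | archives/Pyfiles/integer_mockup.py | remainder_tree_v2
-- ===== SOURCE A (Python) =====
-- def remainder_tree_v2(A, m): #tries a slightly different structure of pairing? might do fewer overall ops
-- 	N = len(A)
-- 	assert N == len(m)
--
-- 	if N == 0: #shouldn't really ever occur but this handles weird cases
-- 		return []
--
-- 	#base case for recursion
-- 	if N == 1:
-- 		return [A[0]%m[0]]
--
--
-- 	#otherwise, return the C_0, then pair every 2 elements
-- 	#the C_i are recovered by either taking a mod, or multiplying then taking a mod
-- 	#it will 'complete' the binary tree so rounds up to nearest power of 2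
--
--
-- 	p_m = []
-- 	for i in range(1,N,2):
-- 		try:
-- 			p_m.append(m[i]*m[i+1])
--
-- 		except IndexError:
-- 			p_m.append(m[i]) #only occurs at the end when N is odd
--
-- 	p_A = [] #careful of mutability issue here
-- 	for i in range(0, N-1, 2):
-- 		p_A.append(A[i]*A[i+1])
--
--
-- 	p_C = remainder_tree_v2(p_A, p_m)
--
-- 	#print ("Traversing up to r(", p_A,",", p_m, ")")
-- 	#print ("Found the answer as ", p_C)
--
--
-- 	C = [A[0]%m[0]]
-- 	for i in range(1,N):
-- 		parent = p_C[(i-1)//2]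
--
-- 		if i%2 == 1:
-- 			C.append(parent%m[i])
--
-- 		if i%2 == 0:
-- 			C.append((parent*A[i])%m[i])
--
-- 		#print ("Now returning: ", C)
-- 		#print ()
-- 	return C
-- ===== SOURCE B (Python) =====
-- def remainder_tree_v2(A, m):
--     # Single forward pass: running product reduced at each index (the value the tree computes).
--     N = len(A)
--     assert N == len(m)
--     out = []
--     prod = 1
--     for a, mi in zip(A, m):
--         prod *= a
--         out.append(prod % mi)
--     return out
-- ===== Notes on version B (the rewrite author's own statement) =====
-- stated objective: simpler
-- what changed: Replaced the recursive remainder tree (pairing elements, recursing on half-size lists, then redistributing parent remainders) by one forward loop keeping a running prefix product reduced modulo m[i] at each index; B is much shorter but its unreduced prefix products make it slower than the tree on large inputs.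
import Mathlib
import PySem

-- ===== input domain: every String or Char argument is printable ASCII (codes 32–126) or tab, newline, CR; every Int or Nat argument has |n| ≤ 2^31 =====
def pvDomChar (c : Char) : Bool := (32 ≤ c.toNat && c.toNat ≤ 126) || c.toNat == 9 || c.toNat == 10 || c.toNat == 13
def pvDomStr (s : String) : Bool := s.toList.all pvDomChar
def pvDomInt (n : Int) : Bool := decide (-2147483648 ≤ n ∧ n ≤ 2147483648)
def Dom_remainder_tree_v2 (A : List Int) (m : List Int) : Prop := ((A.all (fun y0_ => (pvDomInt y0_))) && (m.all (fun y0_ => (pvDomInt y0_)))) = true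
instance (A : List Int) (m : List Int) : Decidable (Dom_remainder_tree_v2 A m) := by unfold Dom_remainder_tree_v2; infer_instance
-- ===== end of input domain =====

-- B replaces the recursive remainder tree by one forward prefix-product loop: much simpler, though slower on large inputs (unreduced prefix products grow).

-- ===== PORT A =====
-- `for i in range(1,N,2): try p_m.append(m[i]*m[i+1]) except IndexError: p_m.append(m[i])`
-- = pair up consecutive elements of m[1:], keeping a lone last element (the IndexError branch):
def pvPairM : List Int → List Int
  | [] => []
  | [x] => [x]
  | x :: y :: rest => (x * y) :: pvPairM rest

-- `for i in range(0, N-1, 2): p_A.append(A[i]*A[i+1])` = pair up consecutive elements, dropping a lone last: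
def pvPairA : List Int → List Int
  | x :: y :: rest => (x * y) :: pvPairA rest
  | _ => []

-- needed by the port's termination proof (cited in decreasing_by)
theorem pvPairA_length : ∀ l : List Int, (pvPairA l).length = l.length / 2
  | [] => by simp [pvPairA]
  | [_] => by simp [pvPairA]
  | _ :: _ :: rest => by simp [pvPairA, pvPairA_length rest]; omega

def remainder_tree_v2 (A : List Int) (m : List Int) : List Int :=
  if A.length ≠ m.length then []            -- `assert N == len(m)` fails: Python raises; excluded by Pre_
  else if A.length = 0 then []
  else if _h1 : A.length = 1 then [PySem.Int.mod (A.getD 0 0) (m.getD 0 0)]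
  else
    let p_C := remainder_tree_v2 (pvPairA A) (pvPairM m.tail)
    PySem.Int.mod (A.getD 0 0) (m.getD 0 0) ::
      (List.range (A.length - 1)).map (fun k =>
        let i := k + 1                       -- `for i in range(1, N)`
        let parent := p_C.getD ((i - 1) / 2) 0
        if i % 2 = 1 then PySem.Int.mod parent (m.getD i 0)
        else PySem.Int.mod (parent * A.getD i 0) (m.getD i 0))
termination_by A.length
decreasing_by simp only [pvPairA_length]; omega

-- ===== PORT B =====
-- `prod = 1; for a, mi in zip(A, m): prod *= a; out.append(prod % mi)`
def pvAltGo (prod : Int) : List Int → List Int → List Int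
  | a :: A', mi :: m' => PySem.Int.mod (prod * a) mi :: pvAltGo (prod * a) A' m'
  | _, _ => []

def remainder_tree_v2_alt (A : List Int) (m : List Int) : List Int :=
  if A.length ≠ m.length then []            -- the assert
  else pvAltGo 1 A m

-- ===== PRECONDITION & SPEC =====
-- Pre_ = exactly the inputs where A returns: equal lengths (else AssertionError) and all moduli
-- nonzero (a zero modulus reaches a `% 0` and raises ZeroDivisionError; B raises there too).
def Pre_remainder_tree_v2 (A : List Int) (m : List Int) : Prop :=
  A.length = m.length ∧ ∀ x ∈ m, x ≠ 0
instance (A : List Int) (m : List Int) : Decidable (Pre_remainder_tree_v2 A m) := by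
  unfold Pre_remainder_tree_v2; infer_instance

def pvWitness_remainder_tree_v2 : List Int × List Int := ([2, 3, -4, 5], [5, 3, 7, -2])

def Spec_remainder_tree_v2 (A : List Int) (m : List Int) (out : List Int) : Prop := out = remainder_tree_v2_alt A m
instance (A : List Int) (m : List Int) (out : List Int) : Decidable (Spec_remainder_tree_v2 A m out) := by unfold Spec_remainder_tree_v2; infer_instance

-- ===== CLAIM (what is proved, stated in full; the proofs are below) =====
def Claim_equal_remainder_tree_v2 : Prop := ∀ (A : List Int) (m : List Int), Dom_remainder_tree_v2 A m → Pre_remainder_tree_v2 A m → Spec_remainder_tree_v2 A m (remainder_tree_v2 A m)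

-- ===== LEMMAS AND PROOFS =====

-- reference value: entry i is (A[0]*…*A[i]) % m[i]
def pvRef (p : Int) (A : List Int) (m : List Int) : List Int :=
  (List.range A.length).map (fun i => PySem.Int.mod (p * (A.take (i + 1)).prod) (m.getD i 0))

theorem pv_mod_mod_dvd (x M d : Int) (h : d ∣ M) :
    PySem.Int.mod (PySem.Int.mod x M) d = PySem.Int.mod x d := by
  simp only [PySem.Int.mod]; exact Int.fmod_fmod_of_dvd x h

theorem pv_mod_mul_mod_dvd (x y M d : Int) (h : d ∣ M) :
    PySem.Int.mod (PySem.Int.mod x M * y) d = PySem.Int.mod (x * y) d := by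
  obtain ⟨c, rfl⟩ := h
  simp only [PySem.Int.mod]
  have hx : Int.fmod x (d * c) = x - d * c * Int.fdiv x (d * c) := by
    rw [Int.fmod_def]
  rw [hx]
  have : (x - d * c * Int.fdiv x (d * c)) * y
      = x * y + d * (-(c * Int.fdiv x (d * c) * y)) := by ring
  rw [this, Int.add_mul_fmod_self_left]

theorem pvAltGo_eq : ∀ (A m : List Int) (p : Int), A.length = m.length →
    pvAltGo p A m = pvRef p A m := by
  intro A
  induction A with
  | nil => intro m p h; cases m with
    | nil => simp [pvAltGo, pvRef]
    | cons _ _ => simp at h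
  | cons a A' ih =>
    intro m p h
    cases m with
    | nil => simp at h
    | cons mi m' =>
      simp only [List.length_cons, Nat.succ_inj] at h
      simp only [pvAltGo, pvRef, List.length_cons, List.range_succ_eq_map,
        List.map_cons, List.map_map]
      refine List.cons_eq_cons.mpr ⟨?_, ?_⟩
      · simp
      · rw [ih m' (p * a) h]
        simp only [pvRef]
        apply List.map_congr_left
        intro k _
        simp [List.take_succ_cons, mul_assoc]

theorem pvPairM_length : ∀ l : List Int, (pvPairM l).length = (l.length + 1) / 2
  | [] => by simp [pvPairM]
  | [_] => by simp [pvPairM]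
  | _ :: _ :: rest => by simp [pvPairM, pvPairM_length rest]; omega

theorem pvPairA_take_prod : ∀ (l : List Int) (j : Nat), 2 * j + 2 ≤ l.length →
    ((pvPairA l).take (j + 1)).prod = (l.take (2 * j + 2)).prod
  | [], j => by intro h; simp at h
  | [x], j => by intro h; simp at h
  | x :: y :: rest, 0 => by intro _; simp [pvPairA]
  | x :: y :: rest, (j' + 1) => by
      intro h
      have ih := pvPairA_take_prod rest j' (by simp at h; omega)
      have h2 : 2 * (j' + 1) + 2 = (2 * j' + 2) + 2 := by ring
      rw [h2]
      simp only [pvPairA, List.take_succ_cons, List.prod_cons]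
      rw [ih]
      ring

theorem pvPairM_getD : ∀ (l : List Int) (j : Nat),
    (pvPairM l).getD j 0 =
      if 2 * j + 1 < l.length then l.getD (2 * j) 0 * l.getD (2 * j + 1) 0
      else l.getD (2 * j) 0
  | [], j => by simp [pvPairM]
  | [x], j => by cases j <;> simp [pvPairM]
  | x :: y :: rest, 0 => by simp [pvPairM]
  | x :: y :: rest, (j' + 1) => by
      have ih := pvPairM_getD rest j'
      have h2 : 2 * (j' + 1) = (2 * j') + 2 := by ring
      simp only [pvPairM, List.getD_cons_succ, List.length_cons, h2, ih]
      have hiff : 2 * j' + 2 + 1 < rest.length + 1 + 1 ↔ 2 * j' + 1 < rest.length := by omega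
      rw [if_congr hiff rfl rfl]

theorem pv_tail_getD (m : List Int) (k : Nat) (h : m ≠ []) :
    m.tail.getD k 0 = m.getD (k + 1) 0 := by
  cases m with
  | nil => exact absurd rfl h
  | cons _ _ => rfl

theorem pv_take_prod_succ (A : List Int) (i : Nat) (h : i < A.length) :
    (A.take (i + 1)).prod = (A.take i).prod * A.getD i 0 := by
  rw [List.getD_eq_getElem A 0 h, List.prod_take_succ A i h]

theorem pv_tree_eq : ∀ (n : Nat) (A m : List Int), A.length = n → A.length = m.length →
    remainder_tree_v2 A m = pvRef 1 A m := by
  intro n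
  induction n using Nat.strong_induction_on with
  | _ n ih =>
    intro A m hn hlen
    rw [remainder_tree_v2]
    rw [if_neg (by omega)]
    by_cases h0 : A.length = 0
    · rw [if_pos h0]
      have : A = [] := List.length_eq_zero_iff.mp h0
      simp [this, pvRef]
    rw [if_neg h0]
    by_cases h1 : A.length = 1
    · rw [dif_pos h1]
      simp only [pvRef, h1, List.range_one, List.map_cons, List.map_nil]
      have hA : (A.take 1).prod = A.getD 0 0 := by
        cases A with
        | nil => simp at h1
        | cons a t => simp
      rw [hA, one_mul]
    rw [dif_neg h1]
    have hn2 : 2 ≤ A.length := by omega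
    have hmne : m ≠ [] := by
      cases m with
      | nil => rw [List.length_nil] at hlen; omega
      | cons _ _ => simp
    -- the recursive call, characterised by the IH
    have hlenA : (pvPairA A).length = A.length / 2 := pvPairA_length A
    have hlenM : (pvPairM m.tail).length = A.length / 2 := by
      rw [pvPairM_length, List.length_tail]; omega
    have hpC : remainder_tree_v2 (pvPairA A) (pvPairM m.tail)
        = pvRef 1 (pvPairA A) (pvPairM m.tail) := by
      exact ih (A.length / 2) (by omega) _ _ hlenA (by rw [hlenA, hlenM])
    rw [hpC]
    -- compare the two lists entrywise
    simp only [pvRef]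
    have hrange : List.range A.length = 0 :: (List.range (A.length - 1)).map (· + 1) := by
      have : A.length = (A.length - 1) + 1 := by omega
      rw [this, List.range_succ_eq_map]
      simp [Nat.add_comm]
    rw [hrange, List.map_cons, List.map_map]
    refine List.cons_eq_cons.mpr ⟨?_, ?_⟩
    · have hA : (A.take 1).prod = A.getD 0 0 := by
        cases A with
        | nil => simp at h0
        | cons a t => simp
      rw [hA, one_mul]
    apply List.map_congr_left
    intro k hk
    rw [List.mem_range] at hk
    -- the parent value
    have hkd : k / 2 < A.length / 2 := by omega
    have hparent : (List.map
          (fun i => PySem.Int.mod (1 * ((pvPairA A).take (i + 1)).prod) ((pvPairM m.tail).getD i 0))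
          (List.range (pvPairA A).length)).getD ((k + 1 - 1) / 2) 0
        = PySem.Int.mod ((A.take (2 * (k / 2) + 2)).prod) ((pvPairM m.tail).getD (k / 2) 0) := by
      rw [Nat.add_sub_cancel]
      rw [PySem.List.getD_map_range _ _ _ _ (by omega : k / 2 < (pvPairA A).length)]
      rw [pvPairA_take_prod A (k / 2) (by omega), one_mul]
    have hMval : (pvPairM m.tail).getD (k / 2) 0 =
        if 2 * (k / 2) + 2 < A.length then m.getD (2 * (k / 2) + 1) 0 * m.getD (2 * (k / 2) + 2) 0
        else m.getD (2 * (k / 2) + 1) 0 := by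
      rw [pvPairM_getD m.tail (k / 2)]
      have hmt : m.tail.length = A.length - 1 := by rw [List.length_tail, hlen]
      rw [pv_tail_getD m _ hmne, pv_tail_getD m _ hmne]
      by_cases hc : 2 * (k / 2) + 2 < A.length
      · rw [if_pos (by omega), if_pos hc]
      · rw [if_neg (by omega), if_neg hc]
    have hdvd : (m.getD (k + 1) 0) ∣ (pvPairM m.tail).getD (k / 2) 0 := by
      rw [hMval]
      rcases Nat.mod_two_eq_zero_or_one k with he | ho
      · -- k even: k+1 = 2*(k/2)+1
        have hk1 : k + 1 = 2 * (k / 2) + 1 := by omega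
        rw [← hk1]
        split
        · exact Dvd.intro _ rfl
        · exact dvd_refl _
      · -- k odd: k+1 = 2*(k/2)+2, and the `if` condition holds
        have hk1 : k + 1 = 2 * (k / 2) + 2 := by omega
        rw [if_pos (by omega), ← hk1]
        exact Dvd.intro _ (mul_comm _ _)
    rw [hparent]
    simp only [Function.comp_apply, one_mul]
    rcases Nat.mod_two_eq_zero_or_one k with he | ho
    · -- i = k+1 odd
      have hmod : (k + 1) % 2 = 1 := by omega
      rw [if_pos hmod]
      have hk1 : 2 * (k / 2) + 2 = k + 2 := by omega
      rw [hk1]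
      exact pv_mod_mod_dvd _ _ _ hdvd
    · -- i = k+1 even
      have hmod : ¬ (k + 1) % 2 = 1 := by omega
      rw [if_neg hmod]
      have hk1 : 2 * (k / 2) + 2 = k + 1 := by omega
      rw [hk1]
      rw [pv_mod_mul_mod_dvd _ _ _ _ hdvd]
      rw [← pv_take_prod_succ A (k + 1) (by omega)]

-- ===== VERDICT (by name: the statement is the Claim_ definition above) =====
theorem remainder_tree_v2_spec : Claim_equal_remainder_tree_v2 := by
  intro A m _hdom hpre
  unfold Spec_remainder_tree_v2 remainder_tree_v2_alt
  rw [if_neg (by simp [hpre.1])]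
  rw [pv_tree_eq A.length A m rfl hpre.1, pvAltGo_eq A m 1 hpre.1]
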